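-- pv_equiv track=rewrite | github.com/jmgomezl/HederaContentCreatorHelper | src/rag/hedera_blog.py | _merge_duplicate_sections
-- ===== SOURCE A (Python) =====
-- def _merge_duplicate_sections(markdown: str) -> str:
--     sections = _split_h2_sections(markdown)
--     if not sections:
--         return markdown
--
--     merged: dict[str, list[str]] = {}
--     order: list[str] = []
--     for heading, body in sections:
--         key = heading.strip().lower()
--         if key not in merged:
--             merged[key] = [heading] + body
--             order.append(key)
--         else:
--             existing = merged[key]
--             extra = [line for line in body if line.strip()]
--             if extra:
--                 existing.extend([""] + extra)
--             merged[key] = existing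
--
--     rebuilt: list[str] = []
--     for key in order:
--         rebuilt.extend(merged[key])
--     return "\n".join(rebuilt).strip()
--
-- def _split_h2_sections(markdown: str) -> list[tuple[str, list[str]]]:
--     lines = markdown.splitlines()
--     sections: list[tuple[str, list[str]]] = []
--     current_heading: str | None = None
--     current_body: list[str] = []
--
--     for line in lines:
--         if line.startswith("## "):
--             if current_heading is not None:
--                 sections.append((current_heading, current_body))
--             current_heading = line.strip()
--             current_body = []
--         else:
--             if current_heading is not None:
--                 current_body.append(line)
--
--     if current_heading is not None:
--         sections.append((current_heading, current_body))
--
--     return sections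
-- ===== SOURCE B (Python) =====
-- def _merge_duplicate_sections(markdown: str) -> str:
--     # Single fused pass over the lines: merge duplicate H2 sections as they stream by,
--     # instead of first splitting into sections and then merging them.
--     merged: dict[str, list[str]] = {}
--     order: list[str] = []
--     current: str | None = None   # key of the section we are inside, or None before any heading
--     fresh = False                # True if the current section is the first with its key
--     extras: list[str] = []       # body lines collected for a duplicate section
--
--     def flush() -> None:
--         nonlocal extras
--         nonblank = [l for l in extras if l.strip()]
--         if nonblank:
--             merged[current].extend([""] + nonblank)
--         extras = []
--
--     for line in markdown.splitlines():
--         if line.startswith("## "):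
--             if current is not None and not fresh:
--                 flush()
--             key = line.strip().lower()
--             if key not in merged:
--                 merged[key] = [line.strip()]
--                 order.append(key)
--                 fresh = True
--             else:
--                 fresh = False
--             current = key
--         elif current is not None:
--             if fresh:
--                 merged[current].append(line)
--             else:
--                 extras.append(line)
--
--     if current is None:
--         return markdown
--     if not fresh:
--         flush()
--     return "\n".join(l for k in order for l in merged[k]).strip()
-- ===== Notes on version B (the rewrite author's own statement) =====
-- stated objective: alternative
-- what changed: A splits the markdown into H2 sections and then merges duplicates in a second dict loop; B is one fused streaming pass over the lines that maintains the merged dict, the key order and a fresh/duplicate flag with pending extras directly.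
import Mathlib
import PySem

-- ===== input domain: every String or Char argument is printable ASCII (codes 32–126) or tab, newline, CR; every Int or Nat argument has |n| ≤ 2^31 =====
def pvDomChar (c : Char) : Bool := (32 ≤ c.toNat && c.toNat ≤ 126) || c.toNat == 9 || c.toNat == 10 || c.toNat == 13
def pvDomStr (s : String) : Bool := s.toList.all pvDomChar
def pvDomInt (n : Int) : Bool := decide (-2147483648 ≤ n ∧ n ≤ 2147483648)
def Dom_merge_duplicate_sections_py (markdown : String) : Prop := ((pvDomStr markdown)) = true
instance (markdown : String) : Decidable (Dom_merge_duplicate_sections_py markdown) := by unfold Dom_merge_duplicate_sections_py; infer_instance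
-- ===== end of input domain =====

-- B fuses A's two phases (split into H2 sections, then merge duplicates with a dict loop)
-- into one streaming pass over the lines; same asymptotic cost (objective: alternative).


-- ===== PORT A =====
-- _split_h2_sections: loop state = (accumulated sections, current_heading, current_body)
def pvSplitGo (lines : List String) (sections : List (String × List String))
    (ch : Option String) (cb : List String) : List (String × List String) :=
  match lines with
  | [] =>
    match ch with
    | none => sections
    | some h => sections ++ [(h, cb)]
  | l :: rest =>
    if PySem.Str.startswith l "## " then
      match ch with
      | none => pvSplitGo rest sections (some (PySem.Str.strip l)) []
      | some h => pvSplitGo rest (sections ++ [(h, cb)]) (some (PySem.Str.strip l)) []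
    else
      match ch with
      | none => pvSplitGo rest sections none cb
      | some h => pvSplitGo rest sections (some h) (cb ++ [l])

-- the merge loop of _merge_duplicate_sections: state = (merged dict, order)
def pvMergeGo (secs : List (String × List String))
    (merged : PySem.Dict String (List String)) (order : List String) :
    PySem.Dict String (List String) × List String :=
  match secs with
  | [] => (merged, order)
  | (h, body) :: rest =>
    let key := PySem.Str.lower (PySem.Str.strip h)
    match merged.get? key with
    | none => pvMergeGo rest (merged.insert key (h :: body)) (order ++ [key])
    | some existing =>
      let extra := body.filter (fun line => PySem.Str.strip line != "")
      if extra ≠ [] then pvMergeGo rest (merged.insert key (existing ++ "" :: extra)) order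
      else pvMergeGo rest (merged.insert key existing) order

def merge_duplicate_sections_py (markdown : String) : String :=
  let sections := pvSplitGo (PySem.Str.splitlines markdown) [] none []
  if sections = [] then markdown
  else
    let mo := pvMergeGo sections PySem.Dict.empty []
    -- rebuilt: list built by the extend loop over order (merged[key]: key is always present)
    let rebuilt := mo.2.foldl (fun acc k => acc ++ (mo.1.get? k).getD []) []
    PySem.Str.strip (PySem.Str.join "\n" rebuilt)

-- ===== PORT B =====
-- flush(): append [""] + non-blank extras to merged[current] (current is always a key of merged)
def pvFlush (merged : PySem.Dict String (List String)) (current : String)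
    (extras : List String) : PySem.Dict String (List String) :=
  let nonblank := extras.filter (fun line => PySem.Str.strip line != "")
  if nonblank ≠ [] then merged.modify current [] (fun v => v ++ "" :: nonblank) else merged

-- the single fused pass: state = (merged, order, current key, fresh flag, pending extras)
def pvFusedGo (lines : List String) (merged : PySem.Dict String (List String))
    (order : List String) (current : Option String) (fresh : Bool) (extras : List String) :
    PySem.Dict String (List String) × List String × Option String × Bool × List String :=
  match lines with
  | [] => (merged, order, current, fresh, extras)
  | l :: rest =>
    if PySem.Str.startswith l "## " then
      let me : PySem.Dict String (List String) × List String :=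
        match current, fresh with
        | some c, false => (pvFlush merged c extras, [])
        | _, _ => (merged, extras)
      let key := PySem.Str.lower (PySem.Str.strip l)
      if me.1.contains key then
        pvFusedGo rest me.1 order (some key) false me.2
      else
        pvFusedGo rest (me.1.insert key [PySem.Str.strip l]) (order ++ [key]) (some key) true me.2
    else
      match current with
      | none => pvFusedGo rest merged order none fresh extras
      | some c =>
        if fresh then
          pvFusedGo rest (merged.modify c [] (fun v => v ++ [l])) order current fresh extras
        else
          pvFusedGo rest merged order current fresh (extras ++ [l])

def merge_duplicate_sections_py_alt (markdown : String) : String :=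
  match pvFusedGo (PySem.Str.splitlines markdown) PySem.Dict.empty [] none false [] with
  | (_, _, none, _, _) => markdown
  | (m, o, some c, fr, ex) =>
    let m' := if fr then m else pvFlush m c ex
    PySem.Str.strip (PySem.Str.join "\n" (o.flatMap (fun k => (m'.get? k).getD [])))

-- ===== PRECONDITION & SPEC =====
def Spec_merge_duplicate_sections_py (markdown : String) (out : String) : Prop := out = merge_duplicate_sections_py_alt markdown
instance (markdown : String) (out : String) : Decidable (Spec_merge_duplicate_sections_py markdown out) := by unfold Spec_merge_duplicate_sections_py; infer_instance

-- ===== CLAIM (what is proved, stated in full; the proofs are below) =====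
def Claim_equal_merge_duplicate_sections_py : Prop := ∀ (markdown : String), Dom_merge_duplicate_sections_py markdown → Spec_merge_duplicate_sections_py markdown (merge_duplicate_sections_py markdown)

-- ===== LEMMAS AND PROOFS =====

-- `strip` is idempotent (needed because A strips headings once in the splitter and again in the merge loop)
theorem pv_lstrip_prefix (l l' : List Char) (h : PySem.Chars.lstrip l = l) (hp : l' <+: l) :
    PySem.Chars.lstrip l' = l' := by
  unfold PySem.Chars.lstrip at *
  rcases l' with _ | ⟨d, u⟩
  · simp
  · rcases l with _ | ⟨c, t⟩
    · simp at hp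
    · have hd : d = c := by
        obtain ⟨r, hr⟩ := hp
        simpa using congrArg (fun x => x.head?) hr
      rw [List.dropWhile_cons] at h ⊢
      subst hd
      split_ifs at h ⊢ with hc
      · exfalso
        have := List.length_dropWhile_le PySem.Chars.isspace t
        have := congrArg List.length h
        simp at this
        omega
      · rfl

theorem pv_rstrip_prefix (l : List Char) : PySem.Chars.rstrip l <+: l := by
  unfold PySem.Chars.rstrip
  have := List.dropWhile_suffix PySem.Chars.isspace (l := l.reverse)
  simpa using List.reverse_prefix.mpr this

theorem pv_lstrip_lstrip (l : List Char) :
    PySem.Chars.lstrip (PySem.Chars.lstrip l) = PySem.Chars.lstrip l := by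
  simp [PySem.Chars.lstrip, List.dropWhile_idempotent]

theorem pv_rstrip_rstrip (l : List Char) :
    PySem.Chars.rstrip (PySem.Chars.rstrip l) = PySem.Chars.rstrip l := by
  simp [PySem.Chars.rstrip, List.dropWhile_idempotent]

theorem pv_strip_idem (l : List Char) :
    PySem.Chars.strip (PySem.Chars.strip l) = PySem.Chars.strip l := by
  unfold PySem.Chars.strip
  rw [pv_lstrip_prefix (PySem.Chars.lstrip l) _ (pv_lstrip_lstrip l) (pv_rstrip_prefix _),
    pv_rstrip_rstrip]

theorem pv_str_strip_idem (s : String) :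
    PySem.Str.strip (PySem.Str.strip s) = PySem.Str.strip s := by
  apply String.toList_injective
  simpa using pv_strip_idem s.toList

-- re-inserting the value a key already has is a no-op (A's `merged[key] = existing`)
theorem pv_dict_insert_eq_self {κ ν : Type} [BEq κ] [LawfulBEq κ] (d : PySem.Dict κ ν) (k : κ) (v : ν)
    (hn : d.keys.Nodup) (h : d.get? k = some v) : d.insert k v = d := by
  have hc : d.contains k = true := by rw [PySem.Dict.contains_eq_isSome_get?, h]; rfl
  have hm : (k, v) ∈ d.items := (PySem.Dict.get?_eq_some_iff_mem_items d k v hn).mp h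
  apply PySem.Dict.ext
  rw [PySem.Dict.items_insert_of_contains d v hc]
  conv_rhs => rw [← List.map_id d.items]
  apply List.map_congr_left
  intro p hp
  by_cases hk : p.1 = k
  · have : p = (k, v) :=
      List.inj_on_of_nodup_map (f := Prod.fst) (l := d.items) hn hp hm (by simp [hk])
    simp [this]
  · simp [hk]

-- the splitter's section accumulator only ever grows at the back
theorem pv_splitGo_acc (lines : List String) : ∀ (secs : List (String × List String))
    (ch : Option String) (cb : List String),
    pvSplitGo lines secs ch cb = secs ++ pvSplitGo lines [] ch cb := by
  induction lines with
  | nil => intro secs ch cb; cases ch <;> simp [pvSplitGo]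
  | cons l rest ih =>
    intro secs ch cb
    by_cases hl : PySem.Str.startswith l "## " = true
    · cases ch with
      | none => simp only [pvSplitGo]; rw [if_pos hl, if_pos hl]; exact ih secs _ _
      | some h =>
        simp only [pvSplitGo]; rw [if_pos hl, if_pos hl]
        rw [ih (secs ++ [(h, cb)]), ih ([] ++ [(h, cb)])]; simp
    · cases ch with
      | none => simp only [pvSplitGo]; rw [if_neg hl, if_neg hl]; exact ih secs _ _
      | some h => simp only [pvSplitGo]; rw [if_neg hl, if_neg hl]; exact ih secs _ _

theorem pv_splitGo_some_ne_nil (lines : List String) : ∀ (h : String) (cb : List String),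
    pvSplitGo lines [] (some h) cb ≠ [] := by
  induction lines with
  | nil => intro h cb; simp [pvSplitGo]
  | cons l rest ih =>
    intro h cb
    by_cases hl : PySem.Str.startswith l "## " = true <;>
      simp only [pvSplitGo] <;> [rw [if_pos hl]; rw [if_neg hl]]
    · rw [pv_splitGo_acc]; simp
    · exact ih h (cb ++ [l])

-- once a heading has been seen, the fused pass keeps a current key
theorem pv_fused_some (lines : List String) : ∀ (m : PySem.Dict String (List String))
    (o : List String) (c : String) (fr : Bool) (ex : List String),
    ∃ m' o' c' fr' ex', pvFusedGo lines m o (some c) fr ex = (m', o', some c', fr', ex') := by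
  induction lines with
  | nil => intro m o c fr ex; exact ⟨m, o, c, fr, ex, rfl⟩
  | cons l rest ih =>
    intro m o c fr ex
    by_cases hl : PySem.Str.startswith l "## " = true
    · simp only [pvFusedGo]; rw [if_pos hl]
      cases fr <;> simp only [Bool.false_eq_true] <;> split <;> apply ih
    · simp only [pvFusedGo]; rw [if_neg hl]
      cases fr <;> simp only [Bool.false_eq_true, if_false, if_true] <;> apply ih

-- the finish step of the fused pass (flush a pending duplicate)
def pvFinalize (st : PySem.Dict String (List String) × List String × Option String × Bool × List String) :
    PySem.Dict String (List String) × List String :=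
  match st with
  | (m, o, none, _, _) => (m, o)
  | (m, o, some c, fr, ex) => (if fr then m else pvFlush m c ex, o)

-- one step of A's merge loop equals B's section-boundary bookkeeping
theorem pv_step_eq (m : PySem.Dict String (List String)) (h : String)
    (cb : List String) (ex0 : List String) (hn : m.keys.Nodup)
    (hget : m.get? (PySem.Str.lower h) = some ex0) :
    (if (cb.filter (fun line => PySem.Str.strip line != "")) ≠ [] then
        m.insert (PySem.Str.lower h) (ex0 ++ "" :: cb.filter (fun line => PySem.Str.strip line != ""))
      else m.insert (PySem.Str.lower h) ex0)
      = pvFlush m (PySem.Str.lower h) cb := by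
  show _ = if (cb.filter (fun line => PySem.Str.strip line != "")) ≠ [] then
      m.modify (PySem.Str.lower h) [] (fun v => v ++ "" :: cb.filter (fun line => PySem.Str.strip line != ""))
    else m
  simp only [PySem.Dict.modify, PySem.Dict.getD_eq_get?_getD, hget, Option.getD_some]
  split
  · rfl
  · exact pv_dict_insert_eq_self m _ _ hn hget

-- MAIN INVARIANT: from any state inside a section, A's split-then-merge equals the fused pass
theorem pv_go_some (lines : List String) : ∀ (h : String) (cb : List String)
    (m : PySem.Dict String (List String)) (o : List String) (k : String),
    PySem.Str.strip h = h → k = PySem.Str.lower h → m.keys.Nodup →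
    pvMergeGo (pvSplitGo lines [] (some h) cb) m o =
      (match m.get? k with
       | none => pvFinalize (pvFusedGo lines (m.insert k (h :: cb)) (o ++ [k]) (some k) true [])
       | some _ => pvFinalize (pvFusedGo lines m o (some k) false cb)) := by
  induction lines with
  | nil =>
    intro h cb m o k hs hk hn
    subst hk
    simp only [pvSplitGo, pvMergeGo, hs, pvFusedGo, pvFinalize, List.nil_append]
    cases hget : m.get? (PySem.Str.lower h) with
    | none => rfl
    | some ex0 =>
      dsimp only
      simp only [if_false, Bool.false_eq_true]
      rw [← pv_step_eq m h cb ex0 hn hget, apply_ite (fun d => (d, o))]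
  | cons l rest ih =>
    intro h cb m o k hs hk hn
    subst hk
    by_cases hl : PySem.Str.startswith l "## " = true
    · -- a new heading line: close the current section on both sides
      have hA : pvSplitGo (l :: rest) [] (some h) cb
          = (h, cb) :: pvSplitGo rest [] (some (PySem.Str.strip l)) [] := by
        simp only [pvSplitGo]; rw [if_pos hl, pv_splitGo_acc]; simp
      rw [hA]
      simp only [pvMergeGo, hs]
      cases hget : m.get? (PySem.Str.lower h) with
      | none =>
        -- current section was fresh: B's boundary step does nothing
        dsimp only
        rw [ih (PySem.Str.strip l) [] _ _ _ (pv_str_strip_idem l) rfl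
          (PySem.Dict.nodup_keys_insert m _ _ hn)]
        conv_rhs => simp only [pvFusedGo]; rw [if_pos hl]
        rw [PySem.Dict.contains_eq_isSome_get?]
        cases hget2 : (m.insert (PySem.Str.lower h) (h :: cb)).get?
            (PySem.Str.lower (PySem.Str.strip l)) <;> simp
      | some ex0 =>
        -- current section was a duplicate: B's boundary step is the flush
        dsimp only
        rw [← apply_ite (fun d => pvMergeGo (pvSplitGo rest [] (some (PySem.Str.strip l)) []) d o),
          pv_step_eq m h cb ex0 hn hget]
        have hnf : (pvFlush m (PySem.Str.lower h) cb).keys.Nodup := by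
          rw [← pv_step_eq m h cb ex0 hn hget]
          split <;> exact PySem.Dict.nodup_keys_insert m _ _ hn
        rw [ih (PySem.Str.strip l) [] _ _ _ (pv_str_strip_idem l) rfl hnf]
        conv_rhs => simp only [pvFusedGo]; rw [if_pos hl]
        rw [PySem.Dict.contains_eq_isSome_get?]
        cases hget2 : (pvFlush m (PySem.Str.lower h) cb).get?
            (PySem.Str.lower (PySem.Str.strip l)) <;> simp
    · -- a body line: A appends it to current_body, B appends it to merged[current] / extras
      have hA : pvSplitGo (l :: rest) [] (some h) cb
          = pvSplitGo rest [] (some h) (cb ++ [l]) := by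
        simp only [pvSplitGo]; rw [if_neg hl]
      rw [hA, ih h (cb ++ [l]) m o _ hs rfl hn]
      cases hget : m.get? (PySem.Str.lower h) with
      | none =>
        dsimp only
        conv_rhs => simp only [pvFusedGo]; rw [if_neg hl]
        simp only [if_true]
        rw [PySem.Dict.modify, PySem.Dict.getD_eq_get?_getD, PySem.Dict.get?_insert_self,
          PySem.Dict.insert_insert_self]
        simp
      | some ex0 =>
        dsimp only
        conv_rhs => simp only [pvFusedGo]; rw [if_neg hl]
        simp

-- the top-level functions agree for every line list
theorem pv_main (lines : List String) (markdown : String) :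
    (if pvSplitGo lines [] none [] = [] then markdown
     else
       let mo := pvMergeGo (pvSplitGo lines [] none []) PySem.Dict.empty []
       let rebuilt := mo.2.foldl (fun acc k => acc ++ (mo.1.get? k).getD []) []
       PySem.Str.strip (PySem.Str.join "\n" rebuilt)) =
    (match pvFusedGo lines PySem.Dict.empty [] none false [] with
     | (_, _, none, _, _) => markdown
     | (m, o, some c, fr, ex) =>
       let m' := if fr then m else pvFlush m c ex
       PySem.Str.strip (PySem.Str.join "\n" (o.flatMap (fun k => (m'.get? k).getD [])))) := by
  induction lines with
  | nil => simp [pvSplitGo, pvFusedGo]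
  | cons l rest ih =>
    by_cases hl : PySem.Str.startswith l "## " = true
    · have hA : pvSplitGo (l :: rest) [] none [] = pvSplitGo rest [] (some (PySem.Str.strip l)) [] := by
        simp only [pvSplitGo]; rw [if_pos hl]
      rw [hA, if_neg (pv_splitGo_some_ne_nil rest (PySem.Str.strip l) [])]
      have hmerge := pv_go_some rest (PySem.Str.strip l) [] PySem.Dict.empty []
        (PySem.Str.lower (PySem.Str.strip l)) (pv_str_strip_idem l) rfl PySem.Dict.nodup_keys_empty
      simp only [PySem.Dict.get?_empty] at hmerge
      obtain ⟨m', o', c', fr', ex', hst⟩ := pv_fused_some rest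
        (PySem.Dict.empty.insert (PySem.Str.lower (PySem.Str.strip l)) [PySem.Str.strip l])
        ([] ++ [PySem.Str.lower (PySem.Str.strip l)]) (PySem.Str.lower (PySem.Str.strip l)) true []
      have hB : pvFusedGo (l :: rest) PySem.Dict.empty [] none false []
          = (m', o', some c', fr', ex') := by
        conv_lhs => simp only [pvFusedGo]; rw [if_pos hl]
        rw [PySem.Dict.contains_eq_isSome_get?, PySem.Dict.get?_empty]
        simpa using hst
      rw [hmerge, hst, hB]
      simp only [pvFinalize]
      rw [PySem.List.foldl_append_eq_flatMap]
      simp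
    · have hA : pvSplitGo (l :: rest) [] none [] = pvSplitGo rest [] none [] := by
        simp only [pvSplitGo]; rw [if_neg hl]
      have hB : pvFusedGo (l :: rest) PySem.Dict.empty [] none false []
          = pvFusedGo rest PySem.Dict.empty [] none false [] := by
        simp only [pvFusedGo]; rw [if_neg hl]
      rw [hA, hB]
      exact ih

-- ===== VERDICT (by name: the statement is the Claim_ definition above) =====
theorem merge_duplicate_sections_py_spec : Claim_equal_merge_duplicate_sections_py := by
  intro markdown _
  unfold Spec_merge_duplicate_sections_py merge_duplicate_sections_py merge_duplicate_sections_py_alt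
  exact pv_main (PySem.Str.splitlines markdown) markdown
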